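-- pv_equiv track=rewrite | github.com/nmbrune/depaul-DSC430 | A2_1.py | listToNameDict
-- ===== SOURCE A (Python) =====
-- def listToNameDict(nameList, letterList):
--     '''
--     takes in the nameList created by txtToNameList and a letterList as input
--     first it creates a dictionary (nameDict) with every item in the letterList as keys with a value of 0 as a default
--     then uses the nameList to populate that dictionary with values for how many names end in each letter
--     returns the nameDict
--     '''
--     nameDict = {}
--     for letter in letterList:
--         nameDict[letter] = 0
--     for name in nameList:
--         if name[-1] in nameDict:
--             nameDict[name[-1]] += 1
--     return nameDict
-- ===== SOURCE B (Python) =====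
-- def listToNameDict(nameList, letterList):
--     lasts = sorted(name[-1] for name in nameList)
--
--     def bisect(x, strict):
--         # index of the first element not satisfying (< x) resp. (<= x)
--         lo, hi = 0, len(lasts)
--         while lo < hi:
--             mid = (lo + hi) // 2
--             if (lasts[mid] < x) if strict else (lasts[mid] <= x):
--                 lo = mid + 1
--             else:
--                 hi = mid
--         return lo
--
--     return {letter: bisect(letter, False) - bisect(letter, True)
--             for letter in letterList}
-- ===== Notes on version B (the rewrite author's own statement) =====
-- stated objective: alternative
-- what changed: B replaces A's dict of per-letter counters by a sorted array of last characters queried per letter with two binary searches (upper bound minus lower bound); no counting dict exists at any point.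
import Mathlib
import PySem

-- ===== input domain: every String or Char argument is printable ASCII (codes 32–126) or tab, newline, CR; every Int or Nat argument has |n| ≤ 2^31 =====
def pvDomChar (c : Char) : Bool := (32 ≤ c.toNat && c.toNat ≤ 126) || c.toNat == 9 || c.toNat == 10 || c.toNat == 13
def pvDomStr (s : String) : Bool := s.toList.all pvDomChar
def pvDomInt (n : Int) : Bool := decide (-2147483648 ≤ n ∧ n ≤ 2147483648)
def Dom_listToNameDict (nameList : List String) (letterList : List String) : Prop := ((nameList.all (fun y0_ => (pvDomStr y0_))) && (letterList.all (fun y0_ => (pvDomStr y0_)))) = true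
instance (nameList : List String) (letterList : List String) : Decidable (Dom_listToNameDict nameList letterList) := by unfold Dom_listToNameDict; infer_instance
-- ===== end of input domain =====

-- B replaces A's dict of per-letter counters by a sorted array of last characters
-- queried per letter with two binary searches (upper bound minus lower bound);
-- no counting dict exists at any point (objective: alternative algorithm).

-- ===== PORT A =====
def listToNameDict (nameList : List String) (letterList : List String) : List (String × Int) :=
  let nameDict : PySem.Dict String Int :=
    letterList.foldl (fun d letter => d.insert letter 0) PySem.Dict.empty
  let finalDict : PySem.Dict String Int :=
    nameList.foldl (fun d name =>
      match PySem.Str.pyGet? name (-1) with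
      | none => d          -- name[-1] raises IndexError in Python; excluded by Pre_
      | some c =>
        if d.contains (String.mk [c]) then
          d.insert (String.mk [c]) (d.getD (String.mk [c]) 0 + 1)
        else d) nameDict
  finalDict.items

-- ===== PORT B =====
-- name[-1] as a 1-character string (none = empty name, IndexError; excluded by Pre_)
def lastStr? (name : String) : Option String :=
  (PySem.Str.pyGet? name (-1)).map (fun c => String.mk [c])

-- the condition of Source B's inner loop: (lasts[mid] < x) if strict else (lasts[mid] <= x)
def bisPred (x : String) (strict : Bool) (y : String) : Bool :=
  if strict then decide (y < x) else decide (y ≤ x)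

-- Source B's 'bisect': while lo < hi: mid = (lo+hi)//2; lo = mid+1 or hi = mid
-- (lasts[mid] is in range whenever lo < hi ≤ len lasts, so getD is exact there)
def pyBisectLoop (lasts : List String) (x : String) (strict : Bool) (lo hi : Nat) : Nat :=
  if h : lo < hi then
    if bisPred x strict (lasts.getD ((lo + hi) / 2) "") then
      pyBisectLoop lasts x strict ((lo + hi) / 2 + 1) hi
    else
      pyBisectLoop lasts x strict lo ((lo + hi) / 2)
  else lo
termination_by hi - lo
decreasing_by all_goals omega

def listToNameDict_alt (nameList : List String) (letterList : List String) : List (String × Int) :=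
  let lasts : List String :=
    PySem.List.sorted (nameList.filterMap lastStr?) (fun y => y) false
  (letterList.foldl (fun d letter =>
      d.insert letter
        ((pyBisectLoop lasts letter false 0 lasts.length : Int)
          - (pyBisectLoop lasts letter true 0 lasts.length : Int)))
    PySem.Dict.empty).items

-- ===== PRECONDITION & SPEC =====
-- Pre_ excludes exactly the inputs on which Python A raises: an empty string in
-- nameList makes name[-1] raise IndexError (in A and in B alike).
def Pre_listToNameDict (nameList : List String) (letterList : List String) : Prop :=
  ∀ name ∈ nameList, name ≠ ""
instance (nameList : List String) (letterList : List String) : Decidable (Pre_listToNameDict nameList letterList) := by unfold Pre_listToNameDict; infer_instance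

def pvWitness_listToNameDict : List String × List String := (["Anna", "Bob", "maria"], ["a", "b", "c"])

def Spec_listToNameDict (nameList : List String) (letterList : List String) (out : List (String × Int)) : Prop := out = listToNameDict_alt nameList letterList
instance (nameList : List String) (letterList : List String) (out : List (String × Int)) : Decidable (Spec_listToNameDict nameList letterList out) := by unfold Spec_listToNameDict; infer_instance

-- ===== CLAIM (what is proved, stated in full; the proofs are below) =====
def Claim_equal_listToNameDict : Prop := ∀ (nameList : List String) (letterList : List String), Dom_listToNameDict nameList letterList → Pre_listToNameDict nameList letterList → Spec_listToNameDict nameList letterList (listToNameDict nameList letterList)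

-- ===== LEMMAS AND PROOFS =====

-- a dict whose every value is recomputed from its key by f (keeps key order)
def mapVal (f : String → Int) (d : PySem.Dict String Int) : PySem.Dict String Int :=
  PySem.Dict.mk (d.items.map (fun p => (p.1, f p.1)))

theorem mapVal_items (f : String → Int) (d : PySem.Dict String Int) :
    (mapVal f d).items = d.items.map (fun p => (p.1, f p.1)) := rfl

theorem contains_mapVal (f : String → Int) (e : PySem.Dict String Int) (l : String) :
    (mapVal f e).contains l = e.contains l := by
  simp [PySem.Dict.contains_eq_decide_mem_keys, PySem.Dict.keys, mapVal, List.map_map,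
    Function.comp_def]

theorem insert_mapVal (f : String → Int) (e : PySem.Dict String Int) (l : String) :
    (mapVal f e).insert l (f l) = mapVal f (e.insert l 0) := by
  apply PySem.Dict.ext
  by_cases hc : e.contains l = true
  · rw [PySem.Dict.items_insert_of_contains _ _ (by rw [contains_mapVal]; exact hc),
      mapVal_items, mapVal_items, PySem.Dict.items_insert_of_contains _ _ hc,
      List.map_map, List.map_map]
    refine List.map_congr_left ?_
    intro p _
    by_cases hp : p.1 = l <;> simp [hp]
  · rw [PySem.Dict.items_insert_of_not_contains _ _ (by rw [contains_mapVal]; simpa using hc),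
      mapVal_items, mapVal_items, PySem.Dict.items_insert_of_not_contains _ _ (by simpa using hc),
      List.map_append]
    rfl

theorem foldl_insert_mapVal (f : String → Int) :
    ∀ (L : List String) (e : PySem.Dict String Int),
      L.foldl (fun d l => d.insert l (f l)) (mapVal f e)
        = mapVal f (L.foldl (fun d l => d.insert l 0) e) := by
  intro L
  induction L with
  | nil => intro e; rfl
  | cons l L ih =>
      intro e
      simp only [List.foldl_cons, insert_mapVal f e l, ih]

-- A's counting loop only bumps existing keys: item-level characterisation
theorem foldA_items :
    ∀ (xs : List String) (d : PySem.Dict String Int), d.keys.Nodup →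
      (xs.foldl (fun d k => if d.contains k then d.insert k (d.getD k 0 + 1) else d) d).items
        = d.items.map (fun p => (p.1, p.2 + (xs.count p.1 : Int))) := by
  intro xs
  induction xs with
  | nil => intro d _; simp
  | cons x xs ih =>
      intro d hd
      simp only [List.foldl_cons]
      by_cases hc : d.contains x = true
      · rw [if_pos hc, ih _ (PySem.Dict.nodup_keys_insert _ _ _ hd),
          PySem.Dict.items_insert_of_contains _ _ hc, List.map_map]
        refine List.map_congr_left ?_
        intro p hp
        by_cases hp1 : p.1 = x
        · have hv : d.getD p.1 0 = p.2 :=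
            PySem.Dict.getD_of_mem_items d (by simpa using hp) hd 0
          rw [hp1] at hv
          simp only [Function.comp_apply, hp1, beq_self_eq_true, if_pos, List.count_cons, hv]
          congr 1
          push_cast
          ring
        · have hne' : ¬ x = p.1 := fun h => hp1 h.symm
          simp only [Function.comp_apply, List.count_cons]
          simp [hp1, hne']
      · rw [if_neg hc, ih _ hd]
        refine List.map_congr_left ?_
        intro p hp
        have hpk : p.1 ∈ d.keys := PySem.Dict.mem_keys_of_mem_items d hp
        have hne : ¬ p.1 = x := by
          intro h
          subst h
          rw [PySem.Dict.contains_eq_decide_mem_keys] at hc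
          simp [hpk] at hc
        rw [List.count_cons, if_neg (by simp; exact fun h => hne h.symm)]
        simp

-- A's name loop is the counting loop over the list of last characters
theorem foldA_filterMap (nameList : List String) (d : PySem.Dict String Int) :
    nameList.foldl (fun d name =>
      match PySem.Str.pyGet? name (-1) with
      | none => d
      | some c =>
        if d.contains (String.mk [c]) then
          d.insert (String.mk [c]) (d.getD (String.mk [c]) 0 + 1)
        else d) d
    = (nameList.filterMap lastStr?).foldl
        (fun d k => if d.contains k then d.insert k (d.getD k 0 + 1) else d) d := by
  induction nameList generalizing d with
  | nil => rfl
  | cons n ns ih =>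
      cases h : PySem.Str.pyGet? n (-1) with
      | none =>
          have hl : lastStr? n = none := by simp only [lastStr?, h, Option.map_none]
          simp only [List.foldl_cons, h, List.filterMap_cons, hl]
          exact ih _
      | some c =>
          have hl : lastStr? n = some (String.mk [c]) := by
            simp only [lastStr?, h, Option.map_some]
          simp only [List.foldl_cons, h, List.filterMap_cons, hl]
          exact ih _

-- bisPred is downward closed along a ≤-sorted list
theorem bisPred_downward (lasts : List String) (x : String) (strict : Bool)
    (hs : lasts.Pairwise (· ≤ ·)) (i j : Nat) (hij : i ≤ j) (hj : j < lasts.length)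
    (hp : bisPred x strict (lasts.getD j "") = true) :
    bisPred x strict (lasts.getD i "") = true := by
  have hi : i < lasts.length := lt_of_le_of_lt hij hj
  rw [lasts.getD_eq_getElem "" hj] at hp
  rw [lasts.getD_eq_getElem "" hi]
  rcases Nat.lt_or_ge i j with hlt | hge
  · have hle : lasts[i] ≤ lasts[j] := List.pairwise_iff_getElem.mp hs i j hi hj hlt
    cases strict with
    | true  =>
        simp only [bisPred, if_true, decide_eq_true_eq] at hp ⊢
        exact lt_of_le_of_lt hle hp
    | false =>
        simp only [bisPred, Bool.false_eq_true, if_false, decide_eq_true_eq] at hp ⊢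
        exact le_trans hle hp
  · have : i = j := le_antisymm hij hge
    subst this; exact hp

-- all-true prefix counts its own length
theorem countP_take_eq (p : String → Bool) :
    ∀ (l : List String) (lo : Nat), lo ≤ l.length →
      (∀ i (h : i < l.length), i < lo → p l[i] = true) →
      (l.take lo).countP p = lo := by
  intro l
  induction l with
  | nil => intro lo h _; simp [Nat.le_zero.mp h]
  | cons y t ih =>
      intro lo hlo hall
      cases lo with
      | zero => simp
      | succ lo =>
          have hy : p y = true := hall 0 (by simp) (by omega)
          simp only [List.take_succ_cons, List.countP_cons, hy, if_pos]
          rw [ih lo (by simpa using hlo)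
            (fun i hi hilo => hall (i + 1) (by simpa using hi) (by omega))]

-- all-false suffix counts zero
theorem countP_drop_eq (p : String → Bool) (l : List String) (lo : Nat)
    (hall : ∀ i (h : i < l.length), lo ≤ i → p l[i] = false) :
    (l.drop lo).countP p = 0 := by
  rw [List.countP_eq_zero]
  intro a ha
  rcases List.mem_iff_getElem.mp ha with ⟨i, hi, rfl⟩
  rw [List.getElem_drop]
  have hlen : lo + i < l.length := by
    have h2 := hi
    rw [List.length_drop] at h2
    omega
  have hf := hall (lo + i) hlen (by omega)
  simp [hf]

-- the binary search computes countP of its condition on a sorted list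
theorem pyBisectLoop_inv (lasts : List String) (x : String) (strict : Bool)
    (hs : lasts.Pairwise (· ≤ ·)) :
    ∀ (k lo hi : Nat), hi - lo ≤ k → lo ≤ hi → hi ≤ lasts.length →
      (∀ i (h : i < lasts.length), i < lo → bisPred x strict lasts[i] = true) →
      (∀ i (h : i < lasts.length), hi ≤ i → bisPred x strict lasts[i] = false) →
      pyBisectLoop lasts x strict lo hi = lasts.countP (bisPred x strict) := by
  intro k
  induction k with
  | zero =>
      intro lo hi hk hle hlen h1 h2
      have : lo = hi := by omega
      subst this
      rw [pyBisectLoop, dif_neg (by omega)]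
      have hsplit : lasts.countP (bisPred x strict)
          = (lasts.take lo).countP (bisPred x strict)
            + (lasts.drop lo).countP (bisPred x strict) := by
        rw [← List.countP_append, List.take_append_drop]
      rw [hsplit, countP_take_eq _ lasts lo hlen h1,
        countP_drop_eq _ lasts lo (fun i hi hloi => h2 i hi hloi)]
      omega
  | succ k ih =>
      intro lo hi hk hle hlen h1 h2
      by_cases h : lo < hi
      · rw [pyBisectLoop, dif_pos h]
        have hmid1 : lo ≤ (lo + hi) / 2 := by omega
        have hmid2 : (lo + hi) / 2 < hi := by omega
        have hmidlen : (lo + hi) / 2 < lasts.length := by omega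
        rw [lasts.getD_eq_getElem "" hmidlen]
        by_cases hc : bisPred x strict lasts[(lo + hi) / 2] = true
        · rw [if_pos hc]
          refine ih ((lo + hi) / 2 + 1) hi (by omega) (by omega) hlen ?_ h2
          intro i hilen hilt
          rcases Nat.lt_or_ge i lo with hio | hio
          · exact h1 i hilen hio
          · have : bisPred x strict (lasts.getD i "") = true := by
              refine bisPred_downward lasts x strict hs i ((lo + hi) / 2) (by omega) hmidlen ?_
              rw [lasts.getD_eq_getElem "" hmidlen]; exact hc
            rwa [lasts.getD_eq_getElem "" hilen] at this
        · rw [if_neg hc]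
          refine ih lo ((lo + hi) / 2) (by omega) (by omega) (by omega) h1 ?_
          intro i hilen hge
          by_contra hcon
          have hti : bisPred x strict lasts[i] = true := by
            cases hb : bisPred x strict lasts[i]
            · exact absurd hb hcon
            · rfl
          apply hc
          have : bisPred x strict (lasts.getD ((lo + hi) / 2) "") = true := by
            refine bisPred_downward lasts x strict hs ((lo + hi) / 2) i hge hilen ?_
            rw [lasts.getD_eq_getElem "" hilen]; exact hti
          rwa [lasts.getD_eq_getElem "" hmidlen] at this
      · rw [pyBisectLoop, dif_neg h]
        have : lo = hi := by omega
        subst this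
        have hsplit : lasts.countP (bisPred x strict)
            = (lasts.take lo).countP (bisPred x strict)
              + (lasts.drop lo).countP (bisPred x strict) := by
          rw [← List.countP_append, List.take_append_drop]
        rw [hsplit, countP_take_eq _ lasts lo hlen h1,
          countP_drop_eq _ lasts lo (fun i hi hloi => h2 i hi hloi)]
        omega

-- #(y ≤ x) = #(y < x) + #(y = x)
theorem countP_le_split (x : String) :
    ∀ (l : List String),
      l.countP (bisPred x false) = l.countP (bisPred x true) + l.count x := by
  intro l
  induction l with
  | nil => simp
  | cons y t ih =>
      simp only [List.countP_cons, List.count_cons, ih]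
      by_cases hlt : y < x
      · have hle : y ≤ x := le_of_lt hlt
        have hne : (y == x) = false := beq_eq_false_iff_ne.mpr (ne_of_lt hlt)
        simp [bisPred, hlt, hle, hne]
        omega
      · by_cases heq : y = x
        · subst heq
          simp [bisPred, hlt, le_refl]
          omega
        · have hnle : ¬ y ≤ x := fun hle => heq ((lt_or_eq_of_le hle).resolve_left hlt)
          have hne : (y == x) = false := beq_eq_false_iff_ne.mpr heq
          simp [bisPred, hlt, hnle, hne]

-- B's per-letter value is the plain count of that letter among the last characters
theorem bisect_value_eq_count (nameList : List String) (letter : String) :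
    ((pyBisectLoop (PySem.List.sorted (nameList.filterMap lastStr?) (fun y => y) false)
        letter false 0
        (PySem.List.sorted (nameList.filterMap lastStr?) (fun y => y) false).length : Int)
      - (pyBisectLoop (PySem.List.sorted (nameList.filterMap lastStr?) (fun y => y) false)
          letter true 0
          (PySem.List.sorted (nameList.filterMap lastStr?) (fun y => y) false).length : Int))
    = ((nameList.filterMap lastStr?).count letter : Int) := by
  set lasts := PySem.List.sorted (nameList.filterMap lastStr?) (fun y => y) false with hl
  have hperm : lasts.Perm (nameList.filterMap lastStr?) :=
    PySem.List.sorted_perm _ _ _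
  have hpair : lasts.Pairwise (· ≤ ·) := by
    have := PySem.List.sorted_pairwise (nameList.filterMap lastStr?) (fun y => y)
    simpa [hl] using this
  have hfa : pyBisectLoop lasts letter false 0 lasts.length
      = lasts.countP (bisPred letter false) :=
    pyBisectLoop_inv lasts letter false hpair lasts.length 0 lasts.length
      (by omega) (by omega) le_rfl (by omega) (by omega)
  have htr : pyBisectLoop lasts letter true 0 lasts.length
      = lasts.countP (bisPred letter true) :=
    pyBisectLoop_inv lasts letter true hpair lasts.length 0 lasts.length
      (by omega) (by omega) le_rfl (by omega) (by omega)
  rw [hfa, htr, countP_le_split letter lasts, hperm.count_eq]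
  push_cast
  ring

theorem zero_items_eq (letterList : List String) :
    (letterList.foldl (fun d l => d.insert l 0) (PySem.Dict.empty : PySem.Dict String Int)).items
      = (letterList.foldl (fun d l => d.insert l 0)
          (PySem.Dict.empty : PySem.Dict String Int)).items.map (fun p => (p.1, (0 : Int))) := by
  have h : (letterList.foldl (fun d l => d.insert l 0) (PySem.Dict.empty : PySem.Dict String Int))
      = mapVal (fun _ => 0) (letterList.foldl (fun d l => d.insert l 0) PySem.Dict.empty) :=
    foldl_insert_mapVal (fun _ => 0) letterList PySem.Dict.empty
  conv_lhs => rw [h, mapVal_items]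

-- ===== VERDICT (by name: the statement is the Claim_ definition above) =====
theorem listToNameDict_spec : Claim_equal_listToNameDict := by
  intro nameList letterList _ _
  unfold Spec_listToNameDict listToNameDict listToNameDict_alt
  simp only [foldA_filterMap]
  have hnodup :
      (letterList.foldl (fun d l => d.insert l 0)
        (PySem.Dict.empty : PySem.Dict String Int)).keys.Nodup :=
    PySem.Dict.nodup_keys_foldl_insert letterList (fun _ _ => 0) PySem.Dict.empty
      PySem.Dict.nodup_keys_empty
  have hB : letterList.foldl
        (fun d l => d.insert l
          ((pyBisectLoop (PySem.List.sorted (nameList.filterMap lastStr?) (fun y => y) false)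
              l false 0
              (PySem.List.sorted (nameList.filterMap lastStr?) (fun y => y) false).length : Int)
            - (pyBisectLoop (PySem.List.sorted (nameList.filterMap lastStr?) (fun y => y) false)
                l true 0
                (PySem.List.sorted (nameList.filterMap lastStr?) (fun y => y) false).length : Int)))
        (PySem.Dict.empty : PySem.Dict String Int)
      = mapVal (fun k =>
          ((pyBisectLoop (PySem.List.sorted (nameList.filterMap lastStr?) (fun y => y) false)
              k false 0
              (PySem.List.sorted (nameList.filterMap lastStr?) (fun y => y) false).length : Int)
            - (pyBisectLoop (PySem.List.sorted (nameList.filterMap lastStr?) (fun y => y) false)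
                k true 0
                (PySem.List.sorted (nameList.filterMap lastStr?) (fun y => y) false).length : Int)))
          (letterList.foldl (fun d l => d.insert l 0) PySem.Dict.empty) :=
    foldl_insert_mapVal _ letterList PySem.Dict.empty
  rw [foldA_items (nameList.filterMap lastStr?) _ hnodup, hB, mapVal_items]
  conv_lhs => rw [zero_items_eq letterList]
  rw [List.map_map]
  refine List.map_congr_left ?_
  intro p _
  simp only [Function.comp_apply]
  rw [bisect_value_eq_count nameList p.1]
  simp
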